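-- pv_equiv track=rewrite | github.com/TeamCode01/RSO | rso_backend/reports/views.py | filter_fields_by_role
-- ===== SOURCE A (Python) =====
-- def filter_fields_by_role(fields, role):
--     if role == 'regional':
--         return [field for field in fields if field not in ['district_headquarters']]
--     elif role == 'local':
--         return [field for field in fields if field not in ['district_headquarters', 'regional_headquarters']]
--     elif role == 'educational':
--         return [field for field in fields if field not in ['district_headquarters', 'regional_headquarters', 'local_headquarters']]
--     elif role == 'detachment':
--         return [field for field in fields if field not in ['district_headquarters', 'regional_headquarters', 'local_headquarters', 'educational_headquarters']]
--     return fields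
-- ===== SOURCE B (Python) =====
-- # Keep a field iff its headquarters RANK (if any) is at or above the role's
-- # cutoff level: a numeric comparison against two rank tables replaces any
-- # branch chain / exclusion-list membership; explicit accumulator loop.
-- _RANK = {'district_headquarters': 0, 'regional_headquarters': 1,
--          'local_headquarters': 2, 'educational_headquarters': 3}
-- _ROLE_LEVEL = {'regional': 1, 'local': 2, 'educational': 3, 'detachment': 4}
--
--
-- def filter_fields_by_role(fields, role):
--     k = _ROLE_LEVEL.get(role)
--     if k is None:
--         return fields
--     out = []
--     for f in fields:
--         r = _RANK.get(f)
--         if r is None or r >= k: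
--             out.append(f)
--     return out
-- ===== Notes on version B (the rewrite author's own statement) =====
-- stated objective: alternative
-- what changed: Replaces the five-way branch chain over hard-coded exclusion lists by two numeric tables (field->rank, role->cutoff level): a field is kept iff it has no rank or its rank is >= the role's cutoff, computed in one accumulator loop with an integer comparison instead of any list-membership test.
import Mathlib
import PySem

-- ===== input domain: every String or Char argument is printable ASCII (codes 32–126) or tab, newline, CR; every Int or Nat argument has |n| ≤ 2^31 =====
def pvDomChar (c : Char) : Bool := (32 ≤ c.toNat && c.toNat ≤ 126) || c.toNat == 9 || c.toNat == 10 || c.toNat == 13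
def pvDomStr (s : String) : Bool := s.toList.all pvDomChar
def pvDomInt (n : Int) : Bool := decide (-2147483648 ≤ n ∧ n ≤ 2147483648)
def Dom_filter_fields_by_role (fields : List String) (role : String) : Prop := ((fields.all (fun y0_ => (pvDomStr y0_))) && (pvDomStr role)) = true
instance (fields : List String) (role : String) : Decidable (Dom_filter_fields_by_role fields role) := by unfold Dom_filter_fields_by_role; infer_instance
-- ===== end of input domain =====

-- B replaces A's five-way branch chain over exclusion lists by a numeric rank comparison:
-- each headquarters field has a rank, each role a cutoff level; keep a field iff it has
-- no rank or its rank is >= the cutoff (one accumulator loop, no membership tests).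
-- ===== PORT A =====
def filter_fields_by_role (fields : List String) (role : String) : List String :=
  if role == "regional" then
    fields.filter (fun field => !(["district_headquarters"].contains field))
  else if role == "local" then
    fields.filter (fun field => !(["district_headquarters", "regional_headquarters"].contains field))
  else if role == "educational" then
    fields.filter (fun field => !(["district_headquarters", "regional_headquarters", "local_headquarters"].contains field))
  else if role == "detachment" then
    fields.filter (fun field => !(["district_headquarters", "regional_headquarters", "local_headquarters", "educational_headquarters"].contains field))
  else fields

-- ===== PORT B =====
def pvRank : PySem.Dict String Int :=
  PySem.Dict.ofList [("district_headquarters", 0), ("regional_headquarters", 1),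
                     ("local_headquarters", 2), ("educational_headquarters", 3)]

def pvRoleLevel : PySem.Dict String Int :=
  PySem.Dict.ofList [("regional", 1), ("local", 2), ("educational", 3), ("detachment", 4)]

-- 'r is None or r >= k' for this field
def pvKeep (k : Int) (f : String) : Bool :=
  match PySem.Dict.get? pvRank f with
  | none => true
  | some r => decide (k ≤ r)

def filter_fields_by_role_alt (fields : List String) (role : String) : List String :=
  match PySem.Dict.get? pvRoleLevel role with
  | none => fields
  | some k =>
    fields.foldl (fun out f => if pvKeep k f then out ++ [f] else out) []

-- ===== PRECONDITION & SPEC =====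
def Spec_filter_fields_by_role (fields : List String) (role : String) (out : List String) : Prop := out = filter_fields_by_role_alt fields role
instance (fields : List String) (role : String) (out : List String) : Decidable (Spec_filter_fields_by_role fields role out) := by unfold Spec_filter_fields_by_role; infer_instance

-- ===== CLAIM =====
def Claim_equal_filter_fields_by_role : Prop := ∀ (fields : List String) (role : String), Dom_filter_fields_by_role fields role → Spec_filter_fields_by_role fields role (filter_fields_by_role fields role)

-- ===== LEMMAS AND PROOFS =====
theorem pvRank_items : pvRank.items = [("district_headquarters", (0:Int)), ("regional_headquarters", 1), ("local_headquarters", 2), ("educational_headquarters", 3)] := rfl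

theorem pvRoleLevel_items : pvRoleLevel.items = [("regional", (1:Int)), ("local", 2), ("educational", 3), ("detachment", 4)] := rfl

-- for a string outside the rank table, the rank lookup misses
theorem pvRank_none (f : String) (h1 : ¬f = "district_headquarters")
    (h2 : ¬f = "regional_headquarters") (h3 : ¬f = "local_headquarters")
    (h4 : ¬f = "educational_headquarters") : PySem.Dict.get? pvRank f = none := by
  have b1 : (("district_headquarters" : String) == f) = false := beq_eq_false_iff_ne.mpr (Ne.symm h1)
  have b2 : (("regional_headquarters" : String) == f) = false := beq_eq_false_iff_ne.mpr (Ne.symm h2)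
  have b3 : (("local_headquarters" : String) == f) = false := beq_eq_false_iff_ne.mpr (Ne.symm h3)
  have b4 : (("educational_headquarters" : String) == f) = false := beq_eq_false_iff_ne.mpr (Ne.symm h4)
  simp [PySem.Dict.get?, pvRank_items, List.find?, b1, b2, b3, b4]

-- pvKeep at each cutoff agrees pointwise with A's membership test
theorem pvKeep_one (f : String) : pvKeep 1 f = !(["district_headquarters"].contains f) := by
  by_cases h1 : f = "district_headquarters"
  · subst h1; decide
  · by_cases h2 : f = "regional_headquarters"
    · subst h2; decide
    · by_cases h3 : f = "local_headquarters"
      · subst h3; decide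
      · by_cases h4 : f = "educational_headquarters"
        · subst h4; decide
        · simp [pvKeep, pvRank_none f h1 h2 h3 h4, h1]

theorem pvKeep_two (f : String) : pvKeep 2 f = !(["district_headquarters", "regional_headquarters"].contains f) := by
  by_cases h1 : f = "district_headquarters"
  · subst h1; decide
  · by_cases h2 : f = "regional_headquarters"
    · subst h2; decide
    · by_cases h3 : f = "local_headquarters"
      · subst h3; decide
      · by_cases h4 : f = "educational_headquarters"
        · subst h4; decide
        · simp [pvKeep, pvRank_none f h1 h2 h3 h4, h1, h2]

theorem pvKeep_three (f : String) : pvKeep 3 f = !(["district_headquarters", "regional_headquarters", "local_headquarters"].contains f) := by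
  by_cases h1 : f = "district_headquarters"
  · subst h1; decide
  · by_cases h2 : f = "regional_headquarters"
    · subst h2; decide
    · by_cases h3 : f = "local_headquarters"
      · subst h3; decide
      · by_cases h4 : f = "educational_headquarters"
        · subst h4; decide
        · simp [pvKeep, pvRank_none f h1 h2 h3 h4, h1, h2, h3]

theorem pvKeep_four (f : String) : pvKeep 4 f = !(["district_headquarters", "regional_headquarters", "local_headquarters", "educational_headquarters"].contains f) := by
  by_cases h1 : f = "district_headquarters"
  · subst h1; decide
  · by_cases h2 : f = "regional_headquarters"
    · subst h2; decide
    · by_cases h3 : f = "local_headquarters"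
      · subst h3; decide
      · by_cases h4 : f = "educational_headquarters"
        · subst h4; decide
        · simp [pvKeep, pvRank_none f h1 h2 h3 h4, h1, h2, h3, h4]

theorem alt_eq_filter (fields : List String) (role : String) (k : Int)
    (h : PySem.Dict.get? pvRoleLevel role = some k) :
    filter_fields_by_role_alt fields role = fields.filter (pvKeep k) := by
  unfold filter_fields_by_role_alt
  rw [h]
  simpa using PySem.List.foldl_append_if_eq_filter (pvKeep k) fields []

-- ===== VERDICT =====
theorem filter_fields_by_role_spec : Claim_equal_filter_fields_by_role := by
  intro fields role _
  unfold Spec_filter_fields_by_role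
  by_cases h1 : role = "regional"
  · subst h1
    rw [alt_eq_filter fields _ 1 rfl]
    simp only [filter_fields_by_role]
    norm_num
    exact List.filter_congr fun f _ => by simp [pvKeep_one]
  · by_cases h2 : role = "local"
    · subst h2
      rw [alt_eq_filter fields _ 2 rfl]
      simp only [filter_fields_by_role]
      norm_num
      exact List.filter_congr fun f _ => by simp [pvKeep_two]
    · by_cases h3 : role = "educational"
      · subst h3
        rw [alt_eq_filter fields _ 3 rfl]
        simp only [filter_fields_by_role]
        norm_num
        exact List.filter_congr fun f _ => by simp [pvKeep_three]
      · by_cases h4 : role = "detachment"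
        · subst h4
          rw [alt_eq_filter fields _ 4 rfl]
          simp only [filter_fields_by_role]
          norm_num
          exact List.filter_congr fun f _ => by simp [pvKeep_four]
        · have b1 : (("regional" : String) == role) = false := beq_eq_false_iff_ne.mpr (Ne.symm h1)
          have b2 : (("local" : String) == role) = false := beq_eq_false_iff_ne.mpr (Ne.symm h2)
          have b3 : (("educational" : String) == role) = false := beq_eq_false_iff_ne.mpr (Ne.symm h3)
          have b4 : (("detachment" : String) == role) = false := beq_eq_false_iff_ne.mpr (Ne.symm h4)
          have hnone : PySem.Dict.get? pvRoleLevel role = none := by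
            simp [PySem.Dict.get?, pvRoleLevel_items, List.find?, b1, b2, b3, b4]
          unfold filter_fields_by_role filter_fields_by_role_alt
          rw [hnone]
          simp [h1, h2, h3, h4]
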